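-- pv_equiv track=rewrite | github.com/shubhlodhi/sotings-intermediate | po.py | building
-- ===== SOURCE A (Python) =====
-- def building(a,n):
--     count =0
--     if a[0] <= a[n-1]:
--         building = a[0]
--     else:
--         return 0
--
--     for i in range(1,n-1):
--         count+=1
--
--     trapped_water = building*count
--     return trapped_water
-- ===== SOURCE B (Python) =====
-- def building(a, n):
--     # closed form: the loop just counts len(range(1, n-1)) = max(0, n-2)
--     if a[0] <= a[n - 1]:
--         return a[0] * max(0, n - 2)
--     return 0
-- ===== Notes on version B (the rewrite author's own statement) =====
-- stated objective: faster
-- what changed: Replaced the O(n) counting loop with the closed-form count max(0, n-2), making the whole function a single arithmetic expression.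
import Mathlib
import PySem

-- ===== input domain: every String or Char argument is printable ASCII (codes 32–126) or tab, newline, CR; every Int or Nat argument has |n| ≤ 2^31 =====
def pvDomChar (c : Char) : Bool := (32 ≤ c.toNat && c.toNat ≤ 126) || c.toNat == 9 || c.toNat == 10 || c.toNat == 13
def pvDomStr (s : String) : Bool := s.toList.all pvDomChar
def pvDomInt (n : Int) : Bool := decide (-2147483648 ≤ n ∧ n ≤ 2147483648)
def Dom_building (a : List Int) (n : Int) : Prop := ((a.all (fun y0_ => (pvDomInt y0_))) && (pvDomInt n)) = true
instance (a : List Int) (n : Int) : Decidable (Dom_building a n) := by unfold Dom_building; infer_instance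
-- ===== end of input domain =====

-- B replaces A's O(n) counting loop by the closed-form count max(0, n-2): asymptotically faster, same values.


-- ===== PORT A =====
def building (a : List Int) (n : Int) : Int :=
  let count : Int := 0
  if PySem.List.pyGetD a 0 0 ≤ PySem.List.pyGetD a (n - 1) 0 then
    let b : Int := PySem.List.pyGetD a 0 0
    let count : Int := (PySem.List.pyRange 1 (n - 1) 1).foldl (fun c _ => c + 1) count
    b * count
  else 0

-- ===== PORT B =====
def building_alt (a : List Int) (n : Int) : Int :=
  if PySem.List.pyGetD a 0 0 ≤ PySem.List.pyGetD a (n - 1) 0 then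
    PySem.List.pyGetD a 0 0 * max 0 (n - 2)
  else 0

-- ===== PRECONDITION & SPEC =====
-- Pre_ excludes exactly the inputs where a[0] or a[n-1] raises IndexError in Python.
def Pre_building (a : List Int) (n : Int) : Prop :=
  PySem.Raise.InRange a.length 0 ∧ PySem.Raise.InRange a.length (n - 1)
instance (a : List Int) (n : Int) : Decidable (Pre_building a n) := by
  unfold Pre_building; infer_instance
def pvWitness_building : List Int × Int := ([3, 1, 4, 2], 4)
def Spec_building (a : List Int) (n : Int) (out : Int) : Prop := out = building_alt a n
instance (a : List Int) (n : Int) (out : Int) : Decidable (Spec_building a n out) := by unfold Spec_building; infer_instance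

-- ===== CLAIM (what is proved, stated in full; the proofs are below) =====
def Claim_equal_building : Prop := ∀ (a : List Int) (n : Int), Dom_building a n → Pre_building a n → Spec_building a n (building a n)

-- ===== LEMMAS AND PROOFS =====
theorem foldl_count (l : List Int) (c : Int) :
    l.foldl (fun c _ => c + 1) c = c + l.length := by
  induction l generalizing c with
  | nil => simp
  | cons x xs ih => simp [List.foldl, ih]; omega

-- ===== VERDICT (by name: the statement is the Claim_ definition above) =====
theorem building_spec : Claim_equal_building := by
  intro a n _ _
  unfold Spec_building building building_alt
  split_ifs with h
  · show PySem.List.pyGetD a 0 0 *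
        ((PySem.List.pyRange 1 (n - 1) 1).foldl (fun c _ => c + 1) 0) =
        PySem.List.pyGetD a 0 0 * max 0 (n - 2)
    rw [foldl_count]
    rw [PySem.List.length_pyRange_one]
    have : ((n - 1 - 1).toNat : Int) = max 0 (n - 2) := by omega
    rw [this]
    ring
  · rfl
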